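-- pv_equiv track=rewrite | github.com/changpil/pyPractice | 2. Coding Interviews/Sessions/Array/problems/boardGrid.py | boardGrid
-- ===== SOURCE A (Python) =====
-- def boardGrid(n, m):
--     grid = [[None]*m for _ in range(n)]
--     count = 0
--     forward = True
--     for i in range(len(grid)-1, -1, -1):
--         if forward:
--             for j in range(len(grid[0])):
--                 grid[i][j] = count
--                 count += 1
--         else:
--             for j in range(len(grid[0])-1, -1, -1):
--                 grid[i][j] = count
--                 count += 1
--         forward = not forward
--     return grid
-- ===== SOURCE B (Python) =====
-- def boardGrid(n, m):
--     # closed form per row: row i lies at distance k = n-1-i from the bottom; its values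
--     # start at k*m, running left-to-right when k is even and right-to-left when k is odd
--     grid = []
--     for i in range(n):
--         k = n - 1 - i
--         base = k * m
--         if k % 2 == 0:
--             grid.append(list(range(base, base + m)))
--         else:
--             grid.append(list(range(base + m - 1, base - 1, -1)))
--     return grid
-- ===== Notes on version B (the rewrite author's own statement) =====
-- stated objective: alternative
-- what changed: Replaces A's stateful bottom-up fill (mutable pre-allocated grid, running counter, direction toggle, per-cell assignments) with a closed form: each row is a single range() built from its distance k to the bottom (values start at k*m, direction from k's parity).
import Mathlib
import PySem

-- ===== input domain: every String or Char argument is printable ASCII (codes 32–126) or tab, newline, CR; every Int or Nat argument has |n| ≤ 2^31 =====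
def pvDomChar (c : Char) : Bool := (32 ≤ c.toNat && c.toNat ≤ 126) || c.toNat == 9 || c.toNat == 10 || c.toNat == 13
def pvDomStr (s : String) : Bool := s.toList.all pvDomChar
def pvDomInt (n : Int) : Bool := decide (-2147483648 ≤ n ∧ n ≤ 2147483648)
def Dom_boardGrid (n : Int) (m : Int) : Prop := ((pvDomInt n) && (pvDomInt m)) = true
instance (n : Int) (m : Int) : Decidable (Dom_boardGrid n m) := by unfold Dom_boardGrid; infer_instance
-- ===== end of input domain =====

-- B replaces A's stateful bottom-up fill (mutable grid, running counter, direction toggle)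
-- with a closed form: each row is one range() derived from its distance to the bottom; objective: alternative.

-- ===== PORT A =====
-- for j in range(len): grid[i][j] = count; count += 1   (the row is passed and returned explicitly)
def pvFillFwd (len : Int) (row : List Int) (count : Int) : List Int × Int :=
  (PySem.List.pyRange 0 len 1).foldl
    (fun (p : List Int × Int) j => (PySem.List.pySetD p.1 j p.2, p.2 + 1)) (row, count)

-- for j in range(len-1, -1, -1): grid[i][j] = count; count += 1
def pvFillBwd (len : Int) (row : List Int) (count : Int) : List Int × Int :=
  (PySem.List.pyRange (len - 1) (-1) (-1)).foldl
    (fun (p : List Int × Int) j => (PySem.List.pySetD p.1 j p.2, p.2 + 1)) (row, count)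

-- one iteration of A's outer loop, state (grid, count, forward)
def pvSnakeStep (st : List (List Int) × Int × Bool) (i : Int) : List (List Int) × Int × Bool :=
  let grid := st.1
  let count := st.2.1
  let forward := st.2.2
  if forward then
    let p := pvFillFwd ((PySem.List.pyGetD grid 0 []).length : Int) (PySem.List.pyGetD grid i []) count
    (PySem.List.pySetD grid i p.1, p.2, !forward)
  else
    let p := pvFillBwd ((PySem.List.pyGetD grid 0 []).length : Int) (PySem.List.pyGetD grid i []) count
    (PySem.List.pySetD grid i p.1, p.2, !forward)

-- grid = [[None]*m for _ in range(n)]: placeholder 0 stands for None — every cell of a returned row is overwritten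
def boardGrid (n : Int) (m : Int) : List (List Int) :=
  let grid : List (List Int) := (PySem.List.pyRange 0 n 1).map (fun _ => List.replicate m.toNat 0)
  ((PySem.List.pyRange ((grid.length : Int) - 1) (-1) (-1)).foldl pvSnakeStep (grid, 0, true)).1

-- ===== PORT B =====
def boardGrid_alt (n : Int) (m : Int) : List (List Int) :=
  (PySem.List.pyRange 0 n 1).foldl (fun grid i =>
    let k := n - 1 - i
    let base := k * m
    if PySem.Int.mod k 2 == 0 then
      grid ++ [PySem.List.pyRange base (base + m) 1]
    else
      grid ++ [PySem.List.pyRange (base + m - 1) (base - 1) (-1)]) []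


-- ===== PRECONDITION & SPEC =====
def Spec_boardGrid (n : Int) (m : Int) (out : List (List Int)) : Prop := out = boardGrid_alt n m
instance (n : Int) (m : Int) (out : List (List Int)) : Decidable (Spec_boardGrid n m out) := by unfold Spec_boardGrid; infer_instance

-- ===== CLAIM (what is proved, stated in full; the proofs are below) =====
def Claim_equal_boardGrid : Prop := ∀ (n : Int) (m : Int), Dom_boardGrid n m → Spec_boardGrid n m (boardGrid n m)

-- ===== LEMMAS AND PROOFS =====

def pvBrow (m : Int) (L : Nat) (k : Int) : List Int :=
  (List.range L).map (fun j : Nat => k * m + (if k % 2 = 0 then (j : Int) else m - 1 - (j : Int)))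
def pvGridAt (n m : Int) (L : Nat) (i : Int) : List (List Int) :=
  (PySem.List.pyRange 0 n 1).map
    (fun r => if r ≤ i then List.replicate L (0 : Int) else pvBrow m L (n - 1 - r))

theorem fillFwd_spec (L : Nat) (a : Nat) (row : List Int) (c : Int)
    (hrow : row.length = L) (ha : a ≤ L) :
    (PySem.List.pyRange (a : Int) (L : Int) 1).foldl
      (fun (p : List Int × Int) j => (PySem.List.pySetD p.1 j p.2, p.2 + 1)) (row, c)
    = (row.take a ++ (List.range (L - a)).map (fun t : Nat => c + (t : Int)), c + ((L - a : Nat) : Int)) := by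
  induction hd : L - a generalizing a row c with
  | zero =>
    have haL : a = L := by omega
    subst haL
    rw [PySem.List.pyRange_one_eq_nil (by omega)]
    simp [List.take_of_length_le, hrow]
  | succ d ih =>
    have haL : a < L := by omega
    rw [PySem.List.pyRange_one_cons (by exact_mod_cast haL)]
    simp only [List.foldl_cons, PySem.List.pySetD_natCast]
    have h1 : ((a : Int) + 1) = ((a + 1 : Nat) : Int) := by push_cast; ring
    rw [h1, ih (a + 1) (row.set a c) (c + 1) (by simp [hrow]) (by omega) (by omega)]
    have hsplit : (row.set a c).take (a + 1) = row.take a ++ [c] := by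
      rw [List.set_eq_take_append_cons_drop, if_pos (by omega)]
      rw [List.take_append]
      simp [List.length_take, hrow, Nat.min_eq_left (le_of_lt haL)]
    have hrange : (List.range (d + 1)).map (fun t : Nat => c + (t : Int))
        = c :: (List.range d).map (fun t : Nat => c + 1 + (t : Int)) := by
      rw [List.range_succ_eq_map, List.map_cons, List.map_map]
      simp only [Nat.cast_zero, add_zero]
      congr 1
      apply List.map_congr_left
      intro t _
      simp only [Function.comp, Nat.succ_eq_add_one]
      push_cast; ring
    rw [hsplit, hrange]
    simp only [List.append_assoc, List.singleton_append, Prod.mk.injEq]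
    constructor
    · trivial
    · push_cast; ring

theorem fillBwd_spec (a : Int) (row : List Int) (c : Int)
    (ha : -1 ≤ a) (ha2 : a < (row.length : Int)) :
    (PySem.List.pyRange a (-1) (-1)).foldl
      (fun (p : List Int × Int) j => (PySem.List.pySetD p.1 j p.2, p.2 + 1)) (row, c)
    = ((List.range (a + 1).toNat).map (fun t : Nat => c + a - (t : Int)) ++ row.drop (a + 1).toNat, c + a + 1) := by
  induction hd : (a + 1).toNat generalizing a row c with
  | zero =>
    have : a = -1 := by omega
    subst this
    rw [PySem.List.pyRange_neg_one_eq_nil (by omega)]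
    simp
  | succ d ih =>
    have h0 : 0 ≤ a := by omega
    have had : a.toNat = d := by omega
    have hdlen : d < row.length := by omega
    rw [PySem.List.pyRange_neg_one_cons (by omega)]
    simp only [List.foldl_cons, PySem.List.pySetD_of_nonneg row c h0]
    rw [ih (a - 1) (row.set a.toNat c) (c + 1) (by omega) (by simp; omega) (by omega)]
    rw [had]
    have hdrop : (row.set d c).drop d = c :: row.drop (d + 1) := by
      rw [List.drop_set, if_neg (by omega), List.drop_eq_getElem_cons hdlen, Nat.sub_self, List.set_cons_zero]
    rw [hdrop]
    have hrange : (List.range (d + 1)).map (fun t : Nat => c + a - (t : Int))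
        = (List.range d).map (fun t : Nat => (c + 1) + (a - 1) - (t : Int)) ++ [c] := by
      rw [List.range_succ, List.map_append]
      congr 1
      · apply List.map_congr_left; intro t _; ring
      · simp only [List.map_cons, List.map_nil]
        congr 1
        have : (d : Int) = a := by omega
        rw [this]; ring
    rw [hrange]
    simp only [List.append_assoc, List.singleton_append, Prod.mk.injEq]
    constructor
    · trivial
    · ring

theorem gridAt_get (n m : Int) (L : Nat) (i r : Int) (h0 : 0 ≤ r) (hrn : r < n) (hri : r ≤ i) :
    PySem.List.pyGetD (pvGridAt n m L i) r [] = List.replicate L (0 : Int) := by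
  unfold pvGridAt
  rw [PySem.List.pyGetD_map_pyRange_of_nonneg _ n r _ h0 hrn]
  rw [if_pos hri]

theorem gridAt_set (n m : Int) (L : Nat) (i : Int) (h0 : 0 ≤ i) :
    PySem.List.pySetD (pvGridAt n m L i) i (pvBrow m L (n - 1 - i)) = pvGridAt n m L (i - 1) := by
  unfold pvGridAt
  rw [PySem.List.pySetD_of_nonneg _ _ h0]
  apply List.ext_getElem
  · simp
  · intro k h1 h2
    rw [List.getElem_set]
    simp only [List.getElem_map]
    have hlen : k < (PySem.List.pyRange 0 n 1).length := by simpa using h2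
    have hkval : (PySem.List.pyRange 0 n 1)[k] = (k : Int) := by
      rw [PySem.List.getElem_pyRange_one]; ring
    rw [hkval]
    by_cases hk : i.toNat = k
    · rw [if_pos hk]
      have : (k : Int) = i := by omega
      rw [this, if_neg (by omega)]
    · rw [if_neg hk]
      have hne : ((k : Int) ≤ i) ↔ ((k : Int) ≤ i - 1) := by omega
      by_cases hle : (k : Int) ≤ i - 1
      · rw [if_pos (by omega), if_pos hle]
      · rw [if_neg (by omega), if_neg hle]

theorem alt_eq_brow (n m : Int) :
    boardGrid_alt n m = (PySem.List.pyRange 0 n 1).map (fun r => pvBrow m m.toNat (n - 1 - r)) := by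
  unfold boardGrid_alt
  have hstep : (fun (grid : List (List Int)) (i : Int) =>
      let k := n - 1 - i
      let base := k * m
      if PySem.Int.mod k 2 == 0 then
        grid ++ [PySem.List.pyRange base (base + m) 1]
      else
        grid ++ [PySem.List.pyRange (base + m - 1) (base - 1) (-1)])
      = (fun (grid : List (List Int)) (i : Int) =>
        grid ++ [if PySem.Int.mod (n - 1 - i) 2 == 0
          then PySem.List.pyRange ((n - 1 - i) * m) ((n - 1 - i) * m + m) 1
          else PySem.List.pyRange ((n - 1 - i) * m + m - 1) ((n - 1 - i) * m - 1) (-1)]) := by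
    funext grid i
    by_cases h : (PySem.Int.mod (n - 1 - i) 2 == 0) = true
    · rw [if_pos h, if_pos h]
    · rw [if_neg h, if_neg h]
  rw [hstep, PySem.List.foldl_append_singleton_eq_map, List.nil_append]
  apply List.map_congr_left
  intro r hr
  rw [PySem.Int.mod_eq_emod_of_pos (by omega : (0:Int) < 2)]
  by_cases hk : (n - 1 - r) % 2 = 0
  · rw [if_pos (by simp [hk])]
    rw [PySem.List.pyRange_one]
    unfold pvBrow
    have : ((n - 1 - r) * m + m - (n - 1 - r) * m).toNat = m.toNat := by omega
    rw [this]
    apply List.map_congr_left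
    intro t _
    rw [if_pos hk]
  · rw [if_neg (by simp [hk])]
    rw [PySem.List.pyRange_neg_one]
    unfold pvBrow
    have : ((n - 1 - r) * m + m - 1 - ((n - 1 - r) * m - 1)).toNat = m.toNat := by omega
    rw [this]
    apply List.map_congr_left
    intro t _
    rw [if_neg hk]
    ring

-- the filled row equals B's closed-form row (forward direction, even k)
theorem row_even (m : Int) (L : Nat) (k : Int) (hL : L = m.toNat) (hk : k % 2 = 0) :
    (List.range L).map (fun t : Nat => k * (L : Int) + (t : Int)) = pvBrow m L k := by
  unfold pvBrow
  apply List.map_congr_left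
  intro t ht
  have hLm : (L : Int) = m := by
    have : 0 < L := by
      rcases List.mem_range.mp ht with h; omega
    omega
  rw [if_pos hk, hLm]

theorem row_odd (m : Int) (L : Nat) (k : Int) (hL : L = m.toNat) (hk : ¬ k % 2 = 0) :
    (List.range L).map (fun t : Nat => k * (L : Int) + ((L : Int) - 1) - (t : Int)) = pvBrow m L k := by
  unfold pvBrow
  apply List.map_congr_left
  intro t ht
  have hLm : (L : Int) = m := by
    have : 0 < L := by rcases List.mem_range.mp ht with h; omega
    omega
  rw [if_neg hk, hLm]; ring

theorem outer_loop (n m : Int) (L : Nat) (hL : L = m.toNat) (i : Int)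
    (hi1 : -1 ≤ i) (hi2 : i < n) :
    (PySem.List.pyRange i (-1) (-1)).foldl pvSnakeStep
      (pvGridAt n m L i, (n - 1 - i) * L, decide ((n - 1 - i) % 2 = 0))
    = (pvGridAt n m L (-1), n * L, decide (n % 2 = 0)) := by
  induction hd : (i + 1).toNat generalizing i with
  | zero =>
    have : i = -1 := by omega
    subst this
    rw [PySem.List.pyRange_neg_one_eq_nil (by omega)]
    norm_num
  | succ d ih =>
    have h0 : 0 ≤ i := by omega
    set p : Int := n - 1 - i with hp
    rw [PySem.List.pyRange_neg_one_cons (by omega)]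
    rw [List.foldl_cons]
    have hstep : pvSnakeStep (pvGridAt n m L i, p * L, decide (p % 2 = 0)) i
        = (pvGridAt n m L (i - 1), (p + 1) * L, decide ((p + 1) % 2 = 0)) := by
      unfold pvSnakeStep
      simp only []
      rw [gridAt_get n m L i 0 le_rfl (by omega) h0]
      rw [gridAt_get n m L i i h0 (by omega) le_rfl]
      rw [List.length_replicate]
      by_cases hpar : p % 2 = 0
      · rw [if_pos (by simp [hpar])]
        unfold pvFillFwd
        have hf := fillFwd_spec L 0 (List.replicate L (0 : Int)) (p * L) (List.length_replicate) (Nat.zero_le L)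
        push_cast at hf
        rw [hf]
        simp only [List.take_zero, List.nil_append, Nat.sub_zero]
        rw [row_even m L p hL hpar]
        rw [gridAt_set n m L i h0]
        have hcnt : p * (L : Int) + (L : Int) = (p + 1) * L := by ring
        have hfwd : (!decide (p % 2 = 0)) = decide ((p + 1) % 2 = 0) := by
          simp only [← decide_not, decide_eq_decide]
          omega
        rw [hcnt, hfwd]
      · rw [if_neg (by simp [hpar])]
        unfold pvFillBwd
        rw [fillBwd_spec ((L : Int) - 1) _ _ (by omega) (by simp)]
        have hL1 : ((L : Int) - 1 + 1).toNat = L := by omega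
        rw [hL1]
        simp only [List.drop_replicate, Nat.sub_self, List.replicate_zero, List.append_nil]
        have hrow : (List.range L).map (fun t : Nat => p * (L : Int) + ((L : Int) - 1) - (t : Int))
            = pvBrow m L p := row_odd m L p hL hpar
        rw [hrow]
        rw [gridAt_set n m L i h0]
        have hcnt : p * (L : Int) + ((L : Int) - 1) + 1 = (p + 1) * L := by ring
        have hfwd : (!decide (p % 2 = 0)) = decide ((p + 1) % 2 = 0) := by
          simp only [← decide_not, decide_eq_decide]
          omega
        rw [hcnt, hfwd]
    rw [hstep]
    have hii : n - 1 - (i - 1) = p + 1 := by omega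
    have := ih (i - 1) (by omega) (by omega) (by omega)
    rw [hii] at this
    exact this

theorem gridAt_top (n m : Int) :
    pvGridAt n m m.toNat (n - 1) = (PySem.List.pyRange 0 n 1).map (fun _ => List.replicate m.toNat (0 : Int)) := by
  unfold pvGridAt
  apply List.map_congr_left
  intro r hr
  rcases (PySem.List.mem_pyRange_one).mp hr with ⟨h1, h2⟩
  rw [if_pos (by omega)]

theorem gridAt_done (n m : Int) :
    pvGridAt n m m.toNat (-1) = (PySem.List.pyRange 0 n 1).map (fun r => pvBrow m m.toNat (n - 1 - r)) := by
  unfold pvGridAt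
  apply List.map_congr_left
  intro r hr
  rcases (PySem.List.mem_pyRange_one).mp hr with ⟨h1, h2⟩
  rw [if_neg (by omega)]

theorem main_check (n m : Int) : boardGrid n m = boardGrid_alt n m := by
  rw [alt_eq_brow]
  unfold boardGrid
  simp only [List.length_map, PySem.List.length_pyRange_one]
  by_cases hn : n ≤ 0
  · rw [PySem.List.pyRange_one_eq_nil (by omega)]
    have h0 : (n - 0).toNat = 0 := by omega
    rw [h0]
    rw [PySem.List.pyRange_neg_one_eq_nil (by norm_num)]
    simp
  · have hn : 0 < n := by omega
    have hlen : (((n - 0).toNat : Int)) = n := by omega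
    rw [hlen]
    rw [← gridAt_top n m]
    have ho := outer_loop n m m.toNat rfl (n - 1) (by omega) (by omega)
    norm_num at ho
    rw [ho]
    exact gridAt_done n m

-- ===== VERDICT (by name: the statement is the Claim_ definition above) =====
theorem boardGrid_spec : Claim_equal_boardGrid := by
  intro n m _
  unfold Spec_boardGrid
  exact main_check n m
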